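-- pv_equiv track=rewrite | github.com/wavelen-jw/GovPress_PDF_MD | src/report_postprocessor.py | _remove_orphan_bullets_before_quotes
-- ===== SOURCE A (Python) =====
-- def _remove_orphan_bullets_before_quotes(lines: list[str]) -> list[str]:
--     cleaned: list[str] = []
--     for index, line in enumerate(lines):
--         if line.strip() == "-":
--             next_line = lines[index + 1] if index + 1 < len(lines) else ""
--             if next_line.strip().startswith(">"):
--                 continue
--         cleaned.append(line)
--     return cleaned
-- ===== SOURCE B (Python) =====
-- def _remove_orphan_bullets_before_quotes(lines: list[str]) -> list[str]:
--     out: list[str] = []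
--     for line in lines:
--         out.append(line)
--         if line.strip().startswith(">") and len(out) >= 2 and out[-2].strip() == "-":
--             del out[-2]
--     return out
-- ===== Notes on version B (the rewrite author's own statement) =====
-- stated objective: alternative
-- what changed: Instead of peeking ahead at lines[index+1] to decide whether to skip an orphan bullet, B always appends the line and, on seeing a blockquote line, pops the already-emitted bullet element just before it from the output stack.
import Mathlib
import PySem

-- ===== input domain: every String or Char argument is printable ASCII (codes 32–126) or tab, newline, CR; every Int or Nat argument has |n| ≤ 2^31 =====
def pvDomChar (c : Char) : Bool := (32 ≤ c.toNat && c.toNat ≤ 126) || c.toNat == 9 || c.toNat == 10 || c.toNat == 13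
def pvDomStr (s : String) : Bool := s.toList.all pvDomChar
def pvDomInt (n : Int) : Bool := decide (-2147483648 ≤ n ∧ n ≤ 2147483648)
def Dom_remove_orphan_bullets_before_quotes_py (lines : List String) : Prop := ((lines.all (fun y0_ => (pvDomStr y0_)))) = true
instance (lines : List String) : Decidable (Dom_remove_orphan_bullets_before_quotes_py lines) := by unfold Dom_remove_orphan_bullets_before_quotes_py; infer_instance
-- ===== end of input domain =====

-- B replaces A's look-ahead at lines[index+1] by a stack discipline on the output:
-- always emit the line, and on a blockquote line pop the already-emitted orphan
-- bullet just before it (alternative decomposition, same cost).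


-- ===== PORT A =====
-- loop body of A (one enumerate step: index = p.1, line = p.2)
def pvStepA (lines : List String) (cleaned : List String) (p : Int × String) : List String :=
  if PySem.Str.strip p.2 == "-" then
    let next_line := if p.1 + 1 < (lines.length : Int) then PySem.List.pyGetD lines (p.1 + 1) "" else ""
    if PySem.Str.startswith (PySem.Str.strip next_line) ">" then cleaned
    else cleaned ++ [p.2]
  else cleaned ++ [p.2]

def remove_orphan_bullets_before_quotes_py (lines : List String) : List String :=
  (PySem.List.enumerate lines).foldl (pvStepA lines) []

-- ===== PORT B =====
-- loop body of B; the Python list `out` is kept REVERSED (head = last appended),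
-- so `out.append(line)` is cons and `del out[-2]` drops the second element.
def pvStepB (out : List String) (line : String) : List String :=
  let out' := line :: out
  if PySem.Str.startswith (PySem.Str.strip line) ">" then
    match out' with
    | l :: b :: rest => if PySem.Str.strip b == "-" then l :: rest else out'
    | _ => out'
  else out'

def remove_orphan_bullets_before_quotes_py_alt (lines : List String) : List String :=
  (lines.foldl pvStepB []).reverse

-- ===== PRECONDITION & SPEC =====
def Spec_remove_orphan_bullets_before_quotes_py (lines : List String) (out : List String) : Prop := out = remove_orphan_bullets_before_quotes_py_alt lines
instance (lines : List String) (out : List String) : Decidable (Spec_remove_orphan_bullets_before_quotes_py lines out) := by unfold Spec_remove_orphan_bullets_before_quotes_py; infer_instance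

-- ===== CLAIM (what is proved, stated in full; the proofs are below) =====
def Claim_equal_remove_orphan_bullets_before_quotes_py : Prop := ∀ (lines : List String), Dom_remove_orphan_bullets_before_quotes_py lines → Spec_remove_orphan_bullets_before_quotes_py lines (remove_orphan_bullets_before_quotes_py lines)

-- ===== LEMMAS AND PROOFS =====

-- `true` iff the first line of `l` (if any) is a blockquote after stripping
def pvHq : List String → Bool
  | [] => false
  | y :: _ => PySem.Str.startswith (PySem.Str.strip y) ">"

-- common specification: keep each line unless it strips to "-" and the next line is a blockquote
def pvG : List String → List String
  | [] => []
  | x :: rest => (if PySem.Str.strip x == "-" && pvHq rest then [] else [x]) ++ pvG rest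

theorem pvStepA_eq (lines : List String) (x : String) (rest : List String) (k : Nat)
    (acc : List String) (h : lines.drop k = x :: rest) :
    pvStepA lines acc ((k : Int), x) = acc ++ (if PySem.Str.strip x == "-" && pvHq rest then [] else [x]) := by
  have hk : k < lines.length := by
    by_contra hk
    have : lines.drop k = [] := List.drop_eq_nil_of_le (by omega)
    simp [this] at h
  have hlen : lines.length = k + 1 + rest.length := by
    have := congrArg List.length h
    simp [List.length_drop] at this
    omega
  unfold pvStepA
  by_cases hx : PySem.Str.strip x = "-"
  · cases rest with
    | nil =>
      have hcond : ¬ ((k : Int) + 1 < (lines.length : Int)) := by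
        simp only [hlen, List.length_nil]; push_cast; omega
      simp [hx, hcond, pvHq]
      decide
    | cons y rest' =>
      have hcond : (k : Int) + 1 < (lines.length : Int) := by
        simp only [hlen, List.length_cons]; push_cast; omega
      have hdrop : lines.drop (k + 1) = y :: rest' := by
        have := congrArg (List.drop 1) h
        simpa [List.drop_drop, Nat.add_comm] using this
      have hget : PySem.List.pyGetD lines ((k : Int) + 1) "" = y := by
        have hel : lines[k + 1]? = some y := by
          have h2 : (List.drop (k + 1) lines)[0]? = lines[(k + 1) + 0]? :=
            List.getElem?_drop
          rw [hdrop] at h2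
          simpa using h2.symm
        have hcast : ((k : Int) + 1) = ((k + 1 : Nat) : Int) := by push_cast; ring
        rw [hcast, PySem.List.pyGetD_natCast, List.getD_eq_getElem?_getD, hel]
        rfl
      simp only [hx, hcond, if_true, hget, pvHq]
      by_cases hy : PySem.Chars.startswith (PySem.Chars.strip y.toList) ['>'] = true <;>
        simp [hy]
  · simp [hx]

theorem pvFoldA (lines : List String) : ∀ (l : List String) (k : Nat) (acc : List String),
    lines.drop k = l →
    List.foldl (pvStepA lines) acc (PySem.List.enumerate l (k : Int)) = acc ++ pvG l := by
  intro l
  induction l with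
  | nil => intro k acc h; simp [PySem.List.enumerate_nil, pvG]
  | cons x rest ih =>
    intro k acc h
    have hdrop : lines.drop (k + 1) = rest := by
      have := congrArg (List.drop 1) h
      simpa [List.drop_drop, Nat.add_comm] using this
    rw [PySem.List.enumerate_cons, List.foldl_cons, pvStepA_eq lines x rest k acc h]
    have hcast : (k : Int) + 1 = ((k + 1 : Nat) : Int) := by push_cast; ring
    rw [hcast, ih (k + 1) _ hdrop, pvG]
    simp

theorem pvFoldB : ∀ (l : List String) (x : String) (acc : List String),
    (List.foldl pvStepB (x :: acc) l).reverse =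
      acc.reverse ++ (if PySem.Str.strip x == "-" && pvHq l then [] else [x]) ++ pvG l := by
  intro l
  induction l with
  | nil => intro x acc; simp [pvHq, pvG]
  | cons y rest ih =>
    intro x acc
    rw [List.foldl_cons]
    by_cases hy : PySem.Chars.startswith (PySem.Chars.strip y.toList) ['>'] = true
    · by_cases hx : PySem.Str.strip x = "-"
      · have hstep : pvStepB (x :: acc) y = y :: acc := by simp [pvStepB, hy, hx]
        rw [hstep, ih y acc]
        simp [pvHq, hy, hx, pvG]
      · have hstep : pvStepB (x :: acc) y = y :: x :: acc := by simp [pvStepB, hy, hx]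
        rw [hstep, ih y (x :: acc)]
        simp [pvHq, hy, hx, pvG]
    · have hstep : pvStepB (x :: acc) y = y :: x :: acc := by
        simp [pvStepB, hy]
      rw [hstep, ih y (x :: acc)]
      simp [pvHq, hy, pvG]

theorem pvAltEq (lines : List String) : remove_orphan_bullets_before_quotes_py_alt lines = pvG lines := by
  cases lines with
  | nil => rfl
  | cons x rest =>
    unfold remove_orphan_bullets_before_quotes_py_alt
    rw [List.foldl_cons]
    have hstep : pvStepB [] x = [x] := by
      unfold pvStepB; split <;> rfl
    rw [hstep, pvFoldB rest x []]
    simp [pvG]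

-- ===== VERDICT (by name: the statement is the Claim_ definition above) =====
theorem remove_orphan_bullets_before_quotes_py_spec : Claim_equal_remove_orphan_bullets_before_quotes_py := by
  intro lines _
  unfold Spec_remove_orphan_bullets_before_quotes_py
  rw [pvAltEq]
  unfold remove_orphan_bullets_before_quotes_py
  have h0 : lines.drop 0 = lines := by simp
  have := pvFoldA lines lines 0 [] h0
  simpa using this
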